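-- pv_equiv track=rewrite | github.com/uraraka-two/j2scanner | jinja2_mask.py | leading_indent
-- ===== SOURCE A (Python) =====
-- def leading_indent(line: str) -> str:
--     out = []
--     for ch in line:
--         if ch in (" ", "\t"):
--             out.append(ch)
--         else:
--             break
--     return "".join(out)
-- ===== SOURCE B (Python) =====
-- def leading_indent(line: str) -> str:
--     stripped = line.lstrip(" \t")
--     return line[:len(line) - len(stripped)]
-- ===== Notes on version B (the rewrite author's own statement) =====
-- stated objective: simpler
-- what changed: Replaces the explicit char-by-char accumulate-and-break loop with lstrip(" \t") plus a length-difference slice, delegating the prefix scan to the library.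
import Mathlib
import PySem

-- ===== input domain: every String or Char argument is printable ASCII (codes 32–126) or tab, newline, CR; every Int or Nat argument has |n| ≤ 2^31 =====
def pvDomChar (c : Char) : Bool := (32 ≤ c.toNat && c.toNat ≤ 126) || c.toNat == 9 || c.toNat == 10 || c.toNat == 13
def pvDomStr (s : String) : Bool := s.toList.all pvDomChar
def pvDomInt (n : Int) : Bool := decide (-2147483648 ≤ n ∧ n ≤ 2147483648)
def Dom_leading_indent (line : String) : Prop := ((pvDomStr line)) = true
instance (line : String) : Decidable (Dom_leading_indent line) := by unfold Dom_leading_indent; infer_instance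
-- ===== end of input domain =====

-- B replaces A's accumulate-and-break loop with lstrip(" \t") plus a length-difference slice (objective: simpler).


-- ===== PORT A =====
-- loop over the characters, appending to `out` until a non-space/tab breaks
def leadLoopA : List Char → List Char
  | [] => []
  | c :: rest => if c == ' ' || c == '\t' then c :: leadLoopA rest else []

def leading_indent (line : String) : String :=
  String.mk (leadLoopA line.toList)

-- ===== PORT B =====
-- stripped = line.lstrip(" \t"); return line[:len(line) - len(stripped)]
def leading_indent_alt (line : String) : String :=
  let cs := line.toList
  let stripped := cs.dropWhile (fun c => c == ' ' || c == '\t')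
  String.mk (cs.take (cs.length - stripped.length))

-- ===== PRECONDITION & SPEC =====
def Spec_leading_indent (line : String) (out : String) : Prop := out = leading_indent_alt line
instance (line : String) (out : String) : Decidable (Spec_leading_indent line out) := by unfold Spec_leading_indent; infer_instance

-- ===== CLAIM (what is proved, stated in full; the proofs are below) =====
def Claim_equal_leading_indent : Prop := ∀ (line : String), Dom_leading_indent line → Spec_leading_indent line (leading_indent line)

-- ===== LEMMAS AND PROOFS =====
theorem leadLoopA_eq (cs : List Char) :
    leadLoopA cs = cs.take (cs.length - (cs.dropWhile (fun c => c == ' ' || c == '\t')).length) := by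
  induction cs with
  | nil => rfl
  | cons c rest ih =>
    by_cases h : (c == ' ' || c == '\t') = true
    · have hle : (rest.dropWhile (fun c => c == ' ' || c == '\t')).length ≤ rest.length :=
        List.length_dropWhile_le _ _
      simp [leadLoopA, h, List.dropWhile, ih]
      have : rest.length + 1 - (rest.dropWhile (fun c => c == ' ' || c == '\t')).length
          = (rest.length - (rest.dropWhile (fun c => c == ' ' || c == '\t')).length) + 1 := by omega
      rw [this]
      simp [List.take]
    · simp [leadLoopA, h, List.dropWhile]

-- ===== VERDICT (by name: the statement is the Claim_ definition above) =====
theorem leading_indent_spec : Claim_equal_leading_indent := by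
  intro line _
  unfold Spec_leading_indent leading_indent leading_indent_alt
  simp [leadLoopA_eq]
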